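-- pv_equiv track=rewrite | github.com/cUDGk/minesweeper | mine.py | solve_subset
-- ===== SOURCE A (Python) =====
-- def solve_subset(constraints):
--     """サブセット制約解析: 2つの制約間の包含関係から推論"""
--     safe = set()
--     mines = set()
--     for i in range(len(constraints)):
--         ri, si = constraints[i]
--         for j in range(len(constraints)):
--             if i == j: continue
--             rj, sj = constraints[j]
--             if si <= sj:
--                 diff = sj - si
--                 rdiff = rj - ri
--                 if rdiff == 0:
--                     safe |= diff
--                 elif rdiff == len(diff):
--                     mines |= diff
--     return safe, mines
-- ===== SOURCE B (Python) =====
-- def solve_subset(constraints):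
--     """Inverted-index reformulation: build a posting map cell -> set of constraint
--     indices whose cell-set contains that cell; the supersets of a constraint's set
--     are then exactly the intersection of the posting sets of its cells, so the
--     per-pair subset test of the naive double scan disappears."""
--     containing = {}
--     for idx, (_, cells) in enumerate(constraints):
--         for c in cells:
--             containing[c] = containing.get(c, set()) | {idx}
--     safe = set()
--     mines = set()
--     for i, (ri, si) in enumerate(constraints):
--         if si:
--             it = iter(si)
--             cand = set(containing[next(it)])
--             for c in it:
--                 cand &= containing[c]
--         else:
--             cand = set(range(len(constraints)))
--         for j in sorted(cand):
--             if j == i: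
--                 continue
--             rj, sj = constraints[j]
--             diff = sj - si
--             rdiff = rj - ri
--             if rdiff == 0:
--                 safe |= diff
--             elif rdiff == len(diff):
--                 mines |= diff
--     return safe, mines
-- ===== Notes on version B (the rewrite author's own statement) =====
-- stated objective: alternative
-- what changed: A's all-pairs scan with a per-pair subset test is replaced by an inverted index (cell -> set of constraint indices containing it) built once; each constraint's supersets are found by intersecting the posting sets of its cells, so the inner subset-testing scan over all constraints disappears.
import Mathlib
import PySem

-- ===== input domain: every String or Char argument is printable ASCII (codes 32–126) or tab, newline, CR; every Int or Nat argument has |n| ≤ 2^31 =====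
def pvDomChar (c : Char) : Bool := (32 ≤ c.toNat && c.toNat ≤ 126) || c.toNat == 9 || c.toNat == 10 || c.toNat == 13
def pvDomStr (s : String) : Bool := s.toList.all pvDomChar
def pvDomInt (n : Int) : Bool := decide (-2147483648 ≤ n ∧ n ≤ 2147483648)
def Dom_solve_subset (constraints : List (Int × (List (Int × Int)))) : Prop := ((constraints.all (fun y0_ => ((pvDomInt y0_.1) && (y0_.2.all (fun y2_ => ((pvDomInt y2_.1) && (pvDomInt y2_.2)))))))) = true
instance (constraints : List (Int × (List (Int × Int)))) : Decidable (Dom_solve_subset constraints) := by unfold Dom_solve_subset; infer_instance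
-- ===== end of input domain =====

-- B replaces A's all-pairs scan with its per-pair subset test by an inverted index
-- (cell -> posting set of constraint indices): supersets are found by intersecting
-- posting sets (alternative decomposition, same worst-case cost class).

-- ===== PORT A =====
def solve_subset (constraints : List (Int × (List (Int × Int)))) : (List (Int × Int)) × (List (Int × Int)) :=
  let n : Int := PySem.List.len constraints
  (PySem.List.pyRange 0 n 1).foldl (fun acc i =>
    let pi := PySem.List.pyGetD constraints i (0, [])
    (PySem.List.pyRange 0 n 1).foldl (fun acc2 j =>
      if i == j then acc2
      else
        let pj := PySem.List.pyGetD constraints j (0, [])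
        if PySem.Set.issubset pi.2 pj.2 then
          let diff := PySem.Set.diff pj.2 pi.2
          let rdiff := pj.1 - pi.1
          if rdiff == 0 then (PySem.Set.union acc2.1 diff, acc2.2)
          else if rdiff == PySem.Set.len diff then (acc2.1, PySem.Set.union acc2.2 diff)
          else acc2
        else acc2) acc) (PySem.Set.empty, PySem.Set.empty)

-- ===== PORT B =====
-- B-side helpers, named pieces of Source B:
-- the 'containing' index ('for idx, (_, cells) in enumerate(constraints): for c in cells: containing[c] = containing.get(c, set()) | {idx}')
def pvPost (cs : List (Int × (List (Int × Int)))) : PySem.Dict (Int × Int) (PySem.Set Int) :=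
  (PySem.List.enumerate cs 0).foldl (fun d p =>
    p.2.2.foldl (fun d c =>
      PySem.Dict.insert d c (PySem.Set.union (PySem.Dict.getD d c PySem.Set.empty) [p.1])) d)
    PySem.Dict.empty

-- the candidate supersets of si ('cand = set(containing[next(it)]); for c in it: cand &= containing[c]'
-- resp. 'set(range(len(constraints)))' for empty si; 'containing[c0]' is always a present key —
-- constraint i registered its own cells — so the total 'getD … Set.empty' computes the Python lookup)
def pvCand (cs : List (Int × (List (Int × Int)))) (si : List (Int × Int)) : PySem.Set Int :=
  match si with
  | [] => PySem.Set.ofList (PySem.List.pyRange 0 (PySem.List.len cs) 1)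
  | c0 :: rest =>
    rest.foldl (fun s c => PySem.Set.inter s (PySem.Dict.getD (pvPost cs) c PySem.Set.empty))
      (PySem.Set.ofList (PySem.Dict.getD (pvPost cs) c0 PySem.Set.empty))

-- the body of Source B's 'for j in sorted(cand):' loop
def pvB (cs : List (Int × (List (Int × Int)))) (i ri : Int) (si : List (Int × Int))
    (acc : PySem.Set (Int × Int) × PySem.Set (Int × Int)) (j : Int) :
    PySem.Set (Int × Int) × PySem.Set (Int × Int) :=
  if j == i then acc
  else
    let pj := PySem.List.pyGetD cs j (0, [])
    let diff := PySem.Set.diff pj.2 si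
    let rdiff := pj.1 - ri
    if rdiff == 0 then (PySem.Set.union acc.1 diff, acc.2)
    else if rdiff == PySem.Set.len diff then (acc.1, PySem.Set.union acc.2 diff)
    else acc

def solve_subset_alt (constraints : List (Int × (List (Int × Int)))) : (List (Int × Int)) × (List (Int × Int)) :=
  (PySem.List.enumerate constraints 0).foldl (fun acc p =>
    (PySem.List.sorted (pvCand constraints p.2.2) (fun x => x) false).foldl
      (pvB constraints p.1 p.2.1 p.2.2) acc)
    (PySem.Set.empty, PySem.Set.empty)

-- ===== PRECONDITION & SPEC =====
def Spec_solve_subset (constraints : List (Int × (List (Int × Int)))) (out : (List (Int × Int)) × (List (Int × Int))) : Prop := out = solve_subset_alt constraints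
instance (constraints : List (Int × (List (Int × Int)))) (out : (List (Int × Int)) × (List (Int × Int))) : Decidable (Spec_solve_subset constraints out) := by unfold Spec_solve_subset; infer_instance

-- ===== CLAIM (what is proved, stated in full; the proofs are below) =====
def Claim_equal_solve_subset : Prop := ∀ (constraints : List (Int × (List (Int × Int)))), Dom_solve_subset constraints → Spec_solve_subset constraints (solve_subset constraints)

-- ===== LEMMAS AND PROOFS =====

-- A's inner-loop body with the index skip removed (pure value form)
def pvG (p : Int × (List (Int × Int))) (acc : PySem.Set (Int × Int) × PySem.Set (Int × Int))
    (q : Int × (List (Int × Int))) : PySem.Set (Int × Int) × PySem.Set (Int × Int) :=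
  if PySem.Set.issubset p.2 q.2 then
    if q.1 - p.1 == 0 then (PySem.Set.union acc.1 (PySem.Set.diff q.2 p.2), acc.2)
    else if q.1 - p.1 == PySem.Set.len (PySem.Set.diff q.2 p.2) then
      (acc.1, PySem.Set.union acc.2 (PySem.Set.diff q.2 p.2))
    else acc
  else acc

-- the subset-assumed inner body of A (no test), indexed form
def pvF (cs : List (Int × (List (Int × Int)))) (ri : Int) (si : List (Int × Int))
    (acc : PySem.Set (Int × Int) × PySem.Set (Int × Int)) (j : Int) :
    PySem.Set (Int × Int) × PySem.Set (Int × Int) :=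
  let pj := PySem.List.pyGetD cs j (0, [])
  if pj.1 - ri == 0 then (PySem.Set.union acc.1 (PySem.Set.diff pj.2 si), acc.2)
  else if pj.1 - ri == PySem.Set.len (PySem.Set.diff pj.2 si) then
    (acc.1, PySem.Set.union acc.2 (PySem.Set.diff pj.2 si))
  else acc

-- the qualifying indices of A's inner loop, in ascending order
def pvQual (cs : List (Int × (List (Int × Int)))) (si : List (Int × Int)) : List Int :=
  (PySem.List.pyRange 0 (PySem.List.len cs) 1).filter
    (fun j => PySem.Set.issubset si (PySem.List.pyGetD cs j (0, [])).2)

theorem pv_diff_self (s : PySem.Set (Int × Int)) : PySem.Set.diff s s = [] := by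
  simp [PySem.Set.diff, List.filter_eq_nil_iff]

theorem pvG_self (p : Int × (List (Int × Int))) (acc : PySem.Set (Int × Int) × PySem.Set (Int × Int)) :
    pvG p acc p = acc := by
  have hs : PySem.Set.issubset p.2 p.2 = true := (PySem.Set.issubset_iff _ _).2 (fun x h => h)
  simp [pvG, hs, pv_diff_self, PySem.Set.union]

theorem pvA_valform (cs : List (Int × (List (Int × Int)))) :
    solve_subset cs = cs.foldl (fun acc p => cs.foldl (pvG p) acc) (PySem.Set.empty, PySem.Set.empty) := by
  unfold solve_subset
  have step1 : ∀ (acc : PySem.Set (Int × Int) × PySem.Set (Int × Int)) (i : Int),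
      i ∈ PySem.List.pyRange 0 (PySem.List.len cs) 1 →
      (PySem.List.pyRange 0 (PySem.List.len cs) 1).foldl (fun acc2 j =>
        if i == j then acc2
        else
          let pj := PySem.List.pyGetD cs j (0, [])
          if PySem.Set.issubset (PySem.List.pyGetD cs i (0, [])).2 pj.2 then
            let diff := PySem.Set.diff pj.2 (PySem.List.pyGetD cs i (0, [])).2
            let rdiff := pj.1 - (PySem.List.pyGetD cs i (0, [])).1
            if rdiff == 0 then (PySem.Set.union acc2.1 diff, acc2.2)
            else if rdiff == PySem.Set.len diff then (acc2.1, PySem.Set.union acc2.2 diff)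
            else acc2
          else acc2) acc
      = cs.foldl (pvG (PySem.List.pyGetD cs i (0, []))) acc := by
    intro acc i _
    have hcongr := PySem.List.foldl_congr_mem (PySem.List.pyRange 0 (PySem.List.len cs) 1)
      (fun acc2 j =>
        if i == j then acc2
        else
          let pj := PySem.List.pyGetD cs j (0, [])
          if PySem.Set.issubset (PySem.List.pyGetD cs i (0, [])).2 pj.2 then
            let diff := PySem.Set.diff pj.2 (PySem.List.pyGetD cs i (0, [])).2
            let rdiff := pj.1 - (PySem.List.pyGetD cs i (0, [])).1
            if rdiff == 0 then (PySem.Set.union acc2.1 diff, acc2.2)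
            else if rdiff == PySem.Set.len diff then (acc2.1, PySem.Set.union acc2.2 diff)
            else acc2
          else acc2)
      (fun acc2 j => pvG (PySem.List.pyGetD cs i (0, [])) acc2 (PySem.List.pyGetD cs j (0, []))) acc ?_
    · rw [hcongr, PySem.List.foldl_pyRange_pyGetD cs (0, []) _ acc (le_refl 0)]
      simp
    · intro acc2 j _
      by_cases hij : i = j
      · subst hij
        simp [pvG_self]
      · have : (i == j) = false := beq_eq_false_iff_ne.mpr hij
        simp only [this, Bool.false_eq_true, if_false, pvG]
  rw [PySem.List.foldl_congr_mem _ _ (fun acc i => cs.foldl (pvG (PySem.List.pyGetD cs i (0, []))) acc) _ step1,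
      PySem.List.foldl_pyRange_pyGetD cs (0, []) (fun acc p => cs.foldl (pvG p) acc) _ (le_refl 0)]
  simp

-- posting-set membership after registering one constraint's cells
theorem pvPost_cells_mem (cells : List (Int × Int)) (d : PySem.Dict (Int × Int) (PySem.Set Int))
    (i : Int) (c : Int × Int) (j : Int) :
    (j ∈ PySem.Dict.getD (cells.foldl (fun d c =>
        PySem.Dict.insert d c (PySem.Set.union (PySem.Dict.getD d c PySem.Set.empty) [i])) d) c PySem.Set.empty)
    ↔ (j ∈ PySem.Dict.getD d c PySem.Set.empty ∨ (c ∈ cells ∧ j = i)) := by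
  induction cells generalizing d with
  | nil => simp
  | cons hd tl ih =>
    rw [List.foldl_cons, ih, PySem.Dict.getD_insert]
    by_cases hc : c = hd
    · subst hc
      simp [PySem.Set.mem_union]
      try tauto
    · simp [hc]
      try tauto

-- posting-set membership of the full index
theorem pvPost_mem (cs : List (Int × (List (Int × Int)))) (c : Int × Int) (j : Int) :
    (j ∈ PySem.Dict.getD (pvPost cs) c PySem.Set.empty)
    ↔ (∃ (k : Nat) (_ : k < cs.length), j = (k : Int) ∧ c ∈ (cs[k]).2) := by
  have gen : ∀ (l : List (Int × (Int × List (Int × Int)))) (d : PySem.Dict (Int × Int) (PySem.Set Int)),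
      (j ∈ PySem.Dict.getD (l.foldl (fun d p =>
          p.2.2.foldl (fun d c =>
            PySem.Dict.insert d c (PySem.Set.union (PySem.Dict.getD d c PySem.Set.empty) [p.1])) d) d) c PySem.Set.empty)
      ↔ (j ∈ PySem.Dict.getD d c PySem.Set.empty ∨ ∃ p ∈ l, c ∈ p.2.2 ∧ j = p.1) := by
    intro l
    induction l with
    | nil => simp
    | cons hd tl ih =>
      intro d
      rw [List.foldl_cons, ih, pvPost_cells_mem]
      constructor
      · rintro (((h | ⟨hc, hj⟩) | ⟨p, hp, hc, hj⟩))
        · exact Or.inl h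
        · exact Or.inr ⟨hd, List.mem_cons_self .., hc, hj⟩
        · exact Or.inr ⟨p, List.mem_cons_of_mem _ hp, hc, hj⟩
      · rintro (h | ⟨p, hp, hc, hj⟩)
        · exact Or.inl (Or.inl h)
        · rcases List.mem_cons.1 hp with rfl | hp
          · exact Or.inl (Or.inr ⟨hc, hj⟩)
          · exact Or.inr ⟨p, hp, hc, hj⟩
  unfold pvPost
  rw [gen]
  rw [PySem.Dict.getD_empty]
  constructor
  · rintro (h | ⟨p, hp, hc, hj⟩)
    · exact absurd h (by simp [PySem.Set.empty])
    · obtain ⟨k, hk, rfl⟩ := (PySem.List.mem_enumerate_iff _ _ _).1 hp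
      exact ⟨k, hk, by simpa using hj, hc⟩
  · rintro ⟨k, hk, hj, hc⟩
    exact Or.inr ⟨(0 + (k : Int), cs[k]), (PySem.List.mem_enumerate_iff _ _ _).2 ⟨k, hk, rfl⟩, hc,
      by simpa using hj⟩

-- candidate-set membership: exactly the qualifying indices
theorem pv_foldl_inter_mem (post : (Int × Int) → PySem.Set Int) (l : List (Int × Int))
    (s0 : PySem.Set Int) (j : Int) :
    (j ∈ l.foldl (fun s c => PySem.Set.inter s (post c)) s0)
    ↔ (j ∈ s0 ∧ ∀ c ∈ l, j ∈ post c) := by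
  induction l generalizing s0 with
  | nil => simp
  | cons hd tl ih =>
    rw [List.foldl_cons, ih]
    simp [PySem.Set.mem_inter]
    tauto

theorem pvCand_mem (cs : List (Int × (List (Int × Int)))) (si : List (Int × Int)) (j : Int) :
    (j ∈ pvCand cs si)
    ↔ (0 ≤ j ∧ j < PySem.List.len cs
        ∧ PySem.Set.issubset si (PySem.List.pyGetD cs j (0, [])).2 = true) := by
  have hlen : PySem.List.len cs = (cs.length : Int) := rfl
  have hgetD : ∀ (k : Nat) (hk : k < cs.length), PySem.List.pyGetD cs (k : Int) (0, []) = cs[k] := by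
    intro k hk
    rw [PySem.List.pyGetD_natCast, List.getD_eq_getElem _ _ hk]
  cases si with
  | nil =>
    simp [pvCand, PySem.Set.mem_ofList, PySem.List.mem_pyRange_one, PySem.Set.issubset_iff]
  | cons c0 rest =>
    rw [pvCand, pv_foldl_inter_mem, PySem.Set.mem_ofList]
    constructor
    · rintro ⟨h0, hrest⟩
      obtain ⟨k, hk, rfl, hc0⟩ := (pvPost_mem cs c0 j).1 h0
      have hmem : ∀ c ∈ (c0 :: rest), c ∈ (cs[k]).2 := by
        intro c hc
        rcases List.mem_cons.1 hc with rfl | hc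
        · exact hc0
        · obtain ⟨k2, hk2, hjk2, hck2⟩ := (pvPost_mem cs c ((k : Nat) : Int)).1 (hrest c hc)
          have hkk : k = k2 := Nat.cast_inj.mp hjk2
          subst hkk
          exact hck2
      refine ⟨Int.natCast_nonneg k, ?_, ?_⟩
      · rw [hlen]
        exact_mod_cast hk
      · rw [hgetD k hk]
        exact (PySem.Set.issubset_iff _ _).2 hmem
    · rintro ⟨h0, hn, hsub⟩
      rw [hlen] at hn
      have hk : j.toNat < cs.length := by omega
      have hj : j = ((j.toNat : Nat) : Int) := by omega
      have hmem := (PySem.Set.issubset_iff _ _).1 hsub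
      rw [hj, hgetD j.toNat hk] at hmem
      constructor
      · exact (pvPost_mem cs c0 j).2 ⟨j.toNat, hk, hj, hmem c0 (by simp)⟩
      · intro c hc
        exact (pvPost_mem cs c j).2 ⟨j.toNat, hk, hj, hmem c (by simp [hc])⟩

theorem pvCand_nodup (cs : List (Int × (List (Int × Int)))) (si : List (Int × Int)) :
    (pvCand cs si).Nodup := by
  cases si with
  | nil => exact PySem.Set.nodup_ofList _
  | cons c0 rest =>
    rw [pvCand]
    have hfold : ∀ (l : List (Int × Int)) (s0 : PySem.Set Int), s0.Nodup →
        (l.foldl (fun s c => PySem.Set.inter s (PySem.Dict.getD (pvPost cs) c PySem.Set.empty)) s0).Nodup := by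
      intro l
      induction l with
      | nil => intro s0 h; exact h
      | cons hd tl ih =>
        intro s0 h
        exact ih _ (PySem.Set.nodup_inter _ _ h)
    exact hfold _ _ (PySem.Set.nodup_ofList _)

theorem pvQual_mem (cs : List (Int × (List (Int × Int)))) (si : List (Int × Int)) (j : Int) :
    (j ∈ pvQual cs si)
    ↔ (0 ≤ j ∧ j < PySem.List.len cs
        ∧ PySem.Set.issubset si (PySem.List.pyGetD cs j (0, [])).2 = true) := by
  simp [pvQual, List.mem_filter, PySem.List.mem_pyRange_one]
  try tauto

theorem pv_sorted_cand (cs : List (Int × (List (Int × Int)))) (si : List (Int × Int)) :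
    PySem.List.sorted (pvCand cs si) (fun x => x) false = pvQual cs si := by
  have hnodupQ : (pvQual cs si).Nodup :=
    (PySem.List.nodup_pyRange_one _ _).filter _
  have hperm : (pvQual cs si).Perm (pvCand cs si) := by
    rw [List.perm_ext_iff_of_nodup hnodupQ (pvCand_nodup cs si)]
    intro a
    rw [pvQual_mem, pvCand_mem]
  have hpair : (pvQual cs si).Pairwise (fun a b => a < b) :=
    (PySem.List.pairwise_lt_pyRange_one _ _).filter _
  exact PySem.List.sorted_eq_of_perm_of_pairwise_lt _ _ _ hperm hpair

-- one row: B's pass over the sorted candidates equals A's pass over all constraints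
theorem pv_inner_eq (cs : List (Int × (List (Int × Int)))) (k : Nat) (hk : k < cs.length)
    (acc : PySem.Set (Int × Int) × PySem.Set (Int × Int)) :
    (PySem.List.sorted (pvCand cs (cs[k].2)) (fun x => x) false).foldl
        (pvB cs (k : Int) (cs[k].1) (cs[k].2)) acc
      = cs.foldl (pvG cs[k]) acc := by
  rw [pv_sorted_cand]
  have hgetD : PySem.List.pyGetD cs (k : Int) (0, []) = cs[k] := by
    rw [PySem.List.pyGetD_natCast, List.getD_eq_getElem _ _ hk]
  -- A's inner loop over all constraints = fold of pvF over the qualifying indices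
  have hA : cs.foldl (pvG cs[k]) acc = (pvQual cs (cs[k].2)).foldl (pvF cs (cs[k].1) (cs[k].2)) acc := by
    have h1 : cs.foldl (pvG cs[k]) acc
        = (PySem.List.pyRange 0 (PySem.List.len cs) 1).foldl
            (fun acc2 j => pvG cs[k] acc2 (PySem.List.pyGetD cs j (0, []))) acc := by
      rw [PySem.List.foldl_pyRange_pyGetD cs (0, []) (pvG cs[k]) acc (le_refl 0)]
      simp
    rw [h1]
    have h2 : ∀ (acc2 : PySem.Set (Int × Int) × PySem.Set (Int × Int)) (j : Int),
        pvG cs[k] acc2 (PySem.List.pyGetD cs j (0, []))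
          = if PySem.Set.issubset (cs[k].2) (PySem.List.pyGetD cs j (0, [])).2
              then pvF cs (cs[k].1) (cs[k].2) acc2 j else acc2 := by
      intro acc2 j
      rfl
    calc (PySem.List.pyRange 0 (PySem.List.len cs) 1).foldl
            (fun acc2 j => pvG cs[k] acc2 (PySem.List.pyGetD cs j (0, []))) acc
        = (PySem.List.pyRange 0 (PySem.List.len cs) 1).foldl
            (fun acc2 j => if PySem.Set.issubset (cs[k].2) (PySem.List.pyGetD cs j (0, [])).2
              then pvF cs (cs[k].1) (cs[k].2) acc2 j else acc2) acc := by
          exact PySem.List.foldl_congr_mem _ _ _ acc (fun acc2 j _ => h2 acc2 j)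
      _ = (pvQual cs (cs[k].2)).foldl (pvF cs (cs[k].1) (cs[k].2)) acc := by
          rw [pvQual, PySem.List.foldl_if_eq_foldl_filter]
  rw [hA]
  -- B's body agrees with pvF on every qualifying index
  refine PySem.List.foldl_congr_mem _ _ _ acc ?_
  intro acc2 j hj
  by_cases hji : j = (k : Int)
  · subst hji
    have : (((k : Int)) == ((k : Int))) = true := by simp
    rw [pvB, if_pos this, pvF]
    rw [hgetD]
    simp [pv_diff_self, PySem.Set.union, PySem.Set.update]
  · have : (j == ((k : Int))) = false := beq_eq_false_iff_ne.mpr hji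
    rw [pvB, if_neg (by simp [this]), pvF]

theorem solve_subset_eq_alt (cs : List (Int × (List (Int × Int)))) :
    solve_subset cs = solve_subset_alt cs := by
  rw [pvA_valform]
  unfold solve_subset_alt
  have hstep : (PySem.List.enumerate cs 0).foldl (fun acc p =>
        (PySem.List.sorted (pvCand cs p.2.2) (fun x => x) false).foldl
          (pvB cs p.1 p.2.1 p.2.2) acc) (PySem.Set.empty, PySem.Set.empty)
      = (PySem.List.enumerate cs 0).foldl (fun acc p => cs.foldl (pvG p.2) acc)
          (PySem.Set.empty, PySem.Set.empty) := by
    refine PySem.List.foldl_congr_mem _ _ _ _ ?_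
    intro acc p hp
    obtain ⟨k, hk, rfl⟩ := (PySem.List.mem_enumerate_iff _ _ _).1 hp
    simpa using pv_inner_eq cs k hk acc
  rw [hstep]
  have hmap : cs.foldl (fun acc p => cs.foldl (pvG p) acc) (PySem.Set.empty, PySem.Set.empty)
      = ((PySem.List.enumerate cs 0).map (·.2)).foldl (fun acc p => cs.foldl (pvG p) acc)
          (PySem.Set.empty, PySem.Set.empty) := by
    rw [PySem.List.map_snd_enumerate]
  rw [hmap, List.foldl_map]

-- ===== VERDICT (by name: the statement is the Claim_ definition above) =====
theorem solve_subset_spec : Claim_equal_solve_subset := by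
  intro cs _
  unfold Spec_solve_subset
  exact solve_subset_eq_alt cs
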